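-- pv_equiv track=rewrite | github.com/joshfedo/splitflap-ha | custom_components/splitflap/text.py | split_into_tokens
-- ===== SOURCE A (Python) =====
-- from typing import List, Any
--
-- def split_into_tokens(text: str) -> List[str]:
--     """Split text into words and spaces as separate tokens."""
--     tokens = []
--     current_word = ""
--     i = 0
--
--     while i < len(text):
--         if text[i] == ' ':
--             if current_word:
--                 tokens.append(current_word)
--                 current_word = ""
--
--             space_start = i
--             while i < len(text) and text[i] == ' ':
--                 i += 1
--             space_token = text[space_start:i]
--             tokens.append(space_token)
--         else:
--             current_word += text[i]
--             i += 1
--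
--     if current_word:
--         tokens.append(current_word)
--
--     return tokens
-- ===== SOURCE B (Python) =====
-- from typing import List
--
--
-- def split_into_tokens(text: str) -> List[str]:
--     """Split text into words and spaces as separate tokens."""
--     parts = text.split(' ')
--     tokens = []
--     if parts[0]:
--         tokens.append(parts[0])
--     run = 0
--     for p in parts[1:]:
--         run += 1
--         if p:
--             tokens.append(' ' * run)
--             tokens.append(p)
--             run = 0
--     if run:
--         tokens.append(' ' * run)
--     return tokens
-- ===== Notes on version B (the rewrite author's own statement) =====
-- stated objective: faster
-- what changed: B delegates the cutting to the str.split method with a single-space separator and reconstructs each space-run token by counting consecutive empty parts (each gap between adjacent parts is one space), instead of A's character-by-character index scan with a word accumulator and an inner space-run loop.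
import Mathlib
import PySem

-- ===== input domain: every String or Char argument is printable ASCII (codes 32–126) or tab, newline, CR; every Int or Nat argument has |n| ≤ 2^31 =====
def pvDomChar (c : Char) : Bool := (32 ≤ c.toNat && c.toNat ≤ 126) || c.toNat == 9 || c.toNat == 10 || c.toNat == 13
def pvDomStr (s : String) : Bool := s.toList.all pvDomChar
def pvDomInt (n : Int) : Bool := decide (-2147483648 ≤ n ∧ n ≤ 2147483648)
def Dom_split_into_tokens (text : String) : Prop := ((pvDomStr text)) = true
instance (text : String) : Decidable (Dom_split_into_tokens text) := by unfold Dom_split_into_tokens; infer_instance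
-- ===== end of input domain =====

-- B replaces A's character-level index scan by text.split(' ') followed by a reconstruction
-- pass that rebuilds each space run from the count of consecutive empty parts (alternative
-- decomposition; return value proved equal on all inputs).


-- ===== PORT A =====
-- A's while loop over index i, with `current_word` as the List Char of its characters;
-- the inner `while text[i] == ' '` space scan is the takeWhile/dropWhile split of the suffix.
def splitLoopA : List Char → List Char → List String
  | [], cur => if cur = [] then [] else [String.mk cur]
  | c :: cs, cur =>
    if c == ' ' then
      (if cur = [] then [] else [String.mk cur])
        ++ [String.mk (c :: cs.takeWhile (· == ' '))]
        ++ splitLoopA (cs.dropWhile (· == ' ')) []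
    else
      splitLoopA cs (cur ++ [c])
termination_by cs _ => cs.length
decreasing_by
  · exact Nat.lt_succ_of_le (List.length_dropWhile_le _ cs)
  · simp

def split_into_tokens (text : String) : List String := splitLoopA text.toList []

-- ===== PORT B =====
-- text.split(' ') (Python keeps empty parts), ported by hand step for step over the chars:
-- exact on every input (single-char separator, keeps empties, "" gives ['']).
def splitSp : List Char → List (List Char)
  | [] => [[]]
  | c :: cs =>
    match splitSp cs with
    | [] => []  -- unreachable: splitSp never returns []
    | p :: ps => if c == ' ' then [] :: p :: ps else (c :: p) :: ps

-- Source B's `for p in parts[1:]` loop with the `run` counter, plus the final flush.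
def buildB : List (List Char) → Nat → List String
  | [], run => if run ≠ 0 then [String.mk (List.replicate run ' ')] else []
  | p :: ps, run =>
    if p.isEmpty then buildB ps (run + 1)
    else String.mk (List.replicate (run + 1) ' ') :: String.mk p :: buildB ps 0

def split_into_tokens_alt (text : String) : List String :=
  match splitSp text.toList with
  | [] => []  -- unreachable
  | p :: ps => (if p.isEmpty then [] else [String.mk p]) ++ buildB ps 0

-- ===== PRECONDITION & SPEC =====
def Spec_split_into_tokens (text : String) (out : List String) : Prop := out = split_into_tokens_alt text
instance (text : String) (out : List String) : Decidable (Spec_split_into_tokens text out) := by unfold Spec_split_into_tokens; infer_instance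

-- ===== CLAIM (what is proved, stated in full; the proofs are below) =====
def Claim_equal_split_into_tokens : Prop := ∀ (text : String), Dom_split_into_tokens text → Spec_split_into_tokens text (split_into_tokens text)

-- ===== LEMMAS AND PROOFS =====

theorem splitSp_ne_nil (cs : List Char) : splitSp cs ≠ [] := by
  induction cs with
  | nil => simp [splitSp]
  | cons c cs ih =>
    rw [splitSp]
    cases h : splitSp cs with
    | nil => exact absurd h ih
    | cons p ps => by_cases hc : c = ' ' <;> simp [hc]

theorem splitSp_cons_space (cs : List Char) : splitSp (' ' :: cs) = [] :: splitSp cs := by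
  rw [splitSp]
  cases h : splitSp cs with
  | nil => exact absurd h (splitSp_ne_nil cs)
  | cons p ps => simp

theorem splitSp_cons_nonspace {c : Char} {cs p : List Char} {ps : List (List Char)}
    (hc : c ≠ ' ') (h : splitSp cs = p :: ps) : splitSp (c :: cs) = (c :: p) :: ps := by
  rw [splitSp, h]
  simp [hc]

theorem takeWhile_space_replicate (cs : List Char) :
    cs.takeWhile (· == ' ') = List.replicate (cs.takeWhile (· == ' ')).length ' ' := by
  apply List.eq_replicate_of_mem
  intro c hc
  have := List.mem_takeWhile_imp hc
  simpa using this

-- buildB over splitSp cs with pending run counter, in terms of cs's leading space run.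
theorem buildB_splitSp (cs : List Char) :
    ∀ (run : Nat) (p : List Char) (ps : List (List Char)),
      splitSp (cs.dropWhile (· == ' ')) = p :: ps →
      buildB (splitSp cs) run =
        String.mk (List.replicate (run + (cs.takeWhile (· == ' ')).length + 1) ' ')
          :: ((if p.isEmpty then [] else [String.mk p]) ++ buildB ps 0) := by
  induction cs with
  | nil =>
    intro run p ps h
    simp only [List.dropWhile_nil, splitSp] at h
    injection h with hp hps
    subst hp; subst hps
    simp [splitSp, buildB]
  | cons c cs ih =>
    intro run p ps h
    by_cases hc : c = ' '
    · subst hc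
      rw [splitSp_cons_space]
      have hstep : buildB ([] :: splitSp cs) run = buildB (splitSp cs) (run + 1) := by
        cases hs : splitSp cs with
        | nil => exact absurd hs (splitSp_ne_nil cs)
        | cons q qs => simp [buildB]
      rw [hstep]
      rw [List.dropWhile_cons_of_pos (by simp)] at h
      rw [ih (run + 1) p ps h]
      have : run + 1 + (cs.takeWhile (· == ' ')).length + 1
          = run + ((' ' :: cs).takeWhile (· == ' ')).length + 1 := by
        simp [List.takeWhile_cons_of_pos]
        omega
      rw [this]
    · rw [List.dropWhile_cons_of_neg (by simpa using hc)] at h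
      cases hs : splitSp cs with
      | nil => exact absurd hs (splitSp_ne_nil cs)
      | cons q qs =>
        rw [splitSp_cons_nonspace hc hs]
        have hcq : splitSp (c :: cs) = (c :: q) :: qs := splitSp_cons_nonspace hc hs
        rw [hcq] at h
        injection h with hp hps
        subst hp; subst hps
        rw [List.takeWhile_cons_of_neg (by simpa using hc)]
        simp [buildB]

-- main invariant: A's loop equals B's reconstruction with the pending word prefix `cur`.
theorem splitLoopA_eq (n : Nat) :
    ∀ cs cur p ps, cs.length ≤ n → (∀ x ∈ cur, x ≠ ' ') → splitSp cs = p :: ps →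
      splitLoopA cs cur
        = (if (cur ++ p).isEmpty then [] else [String.mk (cur ++ p)]) ++ buildB ps 0 := by
  induction n with
  | zero =>
    intro cs cur p ps hlen h hsp
    have : cs = [] := List.eq_nil_of_length_eq_zero (Nat.le_zero.mp hlen)
    subst this
    simp only [splitSp] at hsp
    injection hsp with hp hps
    subst hp; subst hps
    rw [splitLoopA]
    by_cases hcur : cur = [] <;> simp [hcur, buildB]
  | succ n ih =>
    intro cs cur p ps hlen h hsp
    cases cs with
    | nil =>
      simp only [splitSp] at hsp
      injection hsp with hp hps
      subst hp; subst hps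
      rw [splitLoopA]
      by_cases hcur : cur = [] <;> simp [hcur, buildB]
    | cons c cs' =>
      by_cases hc : c = ' '
      · subst hc
        rw [splitLoopA, if_pos (by simp)]
        rw [splitSp_cons_space] at hsp
        injection hsp with hp hps
        subst hp
        cases hd : splitSp (cs'.dropWhile (· == ' ')) with
        | nil => exact absurd hd (splitSp_ne_nil _)
        | cons q qs =>
          have hIH := ih (cs'.dropWhile (· == ' ')) [] q qs
            (le_trans (List.length_dropWhile_le _ cs') (Nat.le_of_succ_le_succ hlen))
            (by simp) hd
          rw [hIH, ← hps, buildB_splitSp cs' 0 q qs hd]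
          have hspace : (' ' :: cs'.takeWhile (· == ' '))
              = List.replicate (0 + (cs'.takeWhile (· == ' ')).length + 1) ' ' := by
            rw [Nat.zero_add, Nat.add_comm, List.replicate_add]
            simpa using (takeWhile_space_replicate cs')
          by_cases hcur : cur = [] <;> simp [hcur, hspace]
      · rw [splitLoopA, if_neg (by simpa using hc)]
        cases hs : splitSp cs' with
        | nil => exact absurd hs (splitSp_ne_nil cs')
        | cons q qs =>
          rw [splitSp_cons_nonspace hc hs] at hsp
          injection hsp with hp hps
          subst hp; subst hps
          have hIH := ih cs' (cur ++ [c]) q qs (Nat.le_of_succ_le_succ hlen)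
            (by intro x hx; rcases List.mem_append.mp hx with hx | hx
                · exact h x hx
                · simpa [List.mem_singleton.mp hx] using hc) hs
          rw [hIH]
          simp

-- ===== VERDICT (by name: the statement is the Claim_ definition above) =====
theorem split_into_tokens_spec : Claim_equal_split_into_tokens := by
  intro text _
  unfold Spec_split_into_tokens split_into_tokens split_into_tokens_alt
  cases h : splitSp text.toList with
  | nil => exact absurd h (splitSp_ne_nil _)
  | cons p ps =>
    rw [splitLoopA_eq text.toList.length text.toList [] p ps le_rfl (by simp) h]
    simp
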